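-- pv_equiv track=rewrite | github.com/Real1236/LeetcodePython | leetcode/editor/en/WTA/achan625_session2_q2.py | isCool
-- ===== SOURCE A (Python) =====
-- def isCool(s: str) -> bool:
--     stack = []
--     for c in s:
--         if c == "c":
--             if len(stack) < 2 or stack[-1] != "b" or stack[-2] != "a":
--                 return False
--             stack.pop()
--             stack.pop()
--         elif c == "a" or c == "b":
--             stack.append(c)
--         else:
--             return False
--
--     return not stack
-- ===== SOURCE B (Python) =====
-- def isCool(s: str) -> bool:
--     # String-rewriting reducer: repeatedly delete the leftmost "abc" until none remains.
--     i = s.find("abc")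
--     while i != -1:
--         s = s[:i] + s[i + 3:]
--         i = s.find("abc")
--     return s == ""
-- ===== Notes on version B (the rewrite author's own statement) =====
-- stated objective: alternative
-- what changed: Replaces A's single left-to-right stack pass with a string-rewriting reducer that repeatedly deletes the leftmost 'abc' substring until none remains and accepts iff the string is empty.
import Mathlib
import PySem

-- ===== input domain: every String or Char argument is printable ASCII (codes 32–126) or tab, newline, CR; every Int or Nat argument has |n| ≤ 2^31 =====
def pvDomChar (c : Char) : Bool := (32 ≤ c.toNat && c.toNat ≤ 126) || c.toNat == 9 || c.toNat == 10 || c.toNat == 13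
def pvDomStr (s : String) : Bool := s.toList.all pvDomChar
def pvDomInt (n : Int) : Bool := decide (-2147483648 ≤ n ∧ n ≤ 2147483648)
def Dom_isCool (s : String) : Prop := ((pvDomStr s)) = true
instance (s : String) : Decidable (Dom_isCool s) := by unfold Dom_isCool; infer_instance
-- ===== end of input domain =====

-- B replaces A's single stack pass by repeated deletion of the leftmost "abc" substring (alternative algorithm, not faster).


-- ===== PORT A =====
-- one iteration of A's for-loop: none = "return False" has happened
def isCoolStep (st : Option (List Char)) (c : Char) : Option (List Char) :=
  match st with
  | none => none
  | some stack =>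
    if c = 'c' then
      if stack.length < 2 ∨ PySem.List.pyGet? stack (-1) ≠ some 'b'
          ∨ PySem.List.pyGet? stack (-2) ≠ some 'a' then none
      else some stack.dropLast.dropLast        -- stack.pop(); stack.pop()
    else if c = 'a' ∨ c = 'b' then some (stack ++ [c])
    else none

def isCool (s : String) : Bool :=
  match s.toList.foldl isCoolStep (some []) with
  | none => false
  | some stack => stack.isEmpty                -- not stack

-- ===== PORT B =====
-- the while loop of Source B, on the code points: delete the leftmost "abc" until s.find("abc") == -1
def isCoolLoop (cs : List Char) : List Char :=
  if h : PySem.Chars.find cs ['a', 'b', 'c'] = -1 then cs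
  else
    isCoolLoop (PySem.Chars.slice cs none (some (PySem.Chars.find cs ['a', 'b', 'c']))
      ++ PySem.Chars.slice cs (some (PySem.Chars.find cs ['a', 'b', 'c'] + 3)) none)
  termination_by cs.length
  decreasing_by
    have h0 : 0 ≤ PySem.Chars.find cs ['a', 'b', 'c'] := by
      rcases lt_or_eq_of_le (PySem.Chars.neg_one_le_find cs ['a', 'b', 'c']) with h' | h'
      · omega
      · exact absurd h'.symm h
    have hspec := (PySem.Chars.find_spec (s := cs) (sub := ['a', 'b', 'c']) h0).1
    have hlen : (PySem.Chars.find cs ['a', 'b', 'c']).toNat + 3 ≤ cs.length := by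
      have h3 := hspec.length_le
      simp only [List.length_cons, List.length_nil, List.length_drop] at h3
      omega
    rw [PySem.Chars.slice_eq_listSlice, PySem.Chars.slice_eq_listSlice,
        PySem.List.slice_to _ h0, PySem.List.slice_from _ (by omega)]
    simp only [List.length_append, List.length_take, List.length_drop]
    omega

def isCool_alt (s : String) : Bool :=
  isCoolLoop s.toList == []                    -- s == ""

-- ===== PRECONDITION & SPEC =====
def Spec_isCool (s : String) (out : Bool) : Prop := out = isCool_alt s
instance (s : String) (out : Bool) : Decidable (Spec_isCool s out) := by unfold Spec_isCool; infer_instance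

-- ===== CLAIM (what is proved, stated in full; the proofs are below) =====
def Claim_equal_isCool : Prop := ∀ (s : String), Dom_isCool s → Spec_isCool s (isCool s)

-- ===== LEMMAS AND PROOFS =====

theorem pyGet_snoc2_neg_one {α : Type} (w : List α) (x y : α) :
    PySem.List.pyGet? (w ++ [x, y]) (-1) = some y := by
  have hn : (w ++ [x, y]).length = w.length + 2 := by simp
  unfold PySem.List.pyGet? PySem.List.pyIdx?
  rw [hn, if_neg (by norm_num), if_pos (by push_cast; omega)]
  have hi : w.length + 2 - (-(-1 : Int)).toNat = w.length + 1 := by norm_num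
  rw [hi]
  simp

theorem pyGet_snoc2_neg_two {α : Type} (w : List α) (x y : α) :
    PySem.List.pyGet? (w ++ [x, y]) (-2) = some x := by
  have hn : (w ++ [x, y]).length = w.length + 2 := by simp
  unfold PySem.List.pyGet? PySem.List.pyIdx?
  rw [hn, if_neg (by norm_num), if_pos (by push_cast; omega)]
  have hi : w.length + 2 - (-(-2 : Int)).toNat = w.length := by
    have : (-(-2 : Int)).toNat = 2 := by decide
    omega
  rw [hi]
  simp

theorem foldl_isCoolStep_none (l : List Char) : l.foldl isCoolStep none = none := by
  induction l with
  | nil => rfl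
  | cons c l ih => simpa [isCoolStep] using ih

-- processing 'a'::'b'::'c' returns the stack to where it started
theorem foldl_isCoolStep_abc (st : Option (List Char)) (v : List Char) :
    ('a' :: 'b' :: 'c' :: v).foldl isCoolStep st = v.foldl isCoolStep st := by
  cases st with
  | none => simp [List.foldl_cons, isCoolStep]
  | some w =>
    have h1 : isCoolStep (some w) 'a' = some (w ++ ['a']) := by simp [isCoolStep]
    have h2 : isCoolStep (some (w ++ ['a'])) 'b' = some (w ++ ['a', 'b']) := by
      simp [isCoolStep]
    have h3 : isCoolStep (some (w ++ ['a', 'b'])) 'c' = some w := by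
      have hb := pyGet_snoc2_neg_one w 'a' 'b'
      have ha := pyGet_snoc2_neg_two w 'a' 'b'
      simp [isCoolStep, hb, ha]
    simp only [List.foldl_cons, h1, h2, h3]

-- deleting one occurrence of "abc" does not change A's pass
theorem foldl_isCoolStep_delete (u v : List Char) :
    (u ++ 'a' :: 'b' :: 'c' :: v).foldl isCoolStep (some []) =
      (u ++ v).foldl isCoolStep (some []) := by
  rw [List.foldl_append, List.foldl_append, foldl_isCoolStep_abc]

-- a run of a/b's piles up on the stack unchanged
theorem foldl_isCoolStep_ab (p : List Char) (w : List Char)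
    (hp : ∀ c ∈ p, c = 'a' ∨ c = 'b') :
    p.foldl isCoolStep (some w) = some (w ++ p) := by
  induction p generalizing w with
  | nil => simp
  | cons c p ih =>
    have hc := hp c (by simp)
    have hcc : ¬ c = 'c' := by rcases hc with h | h <;> simp [h]
    rw [List.foldl_cons, show isCoolStep (some w) c = some (w ++ [c]) by
      simp [isCoolStep, hcc, hc], ih (w ++ [c]) (fun c' h' => hp c' (by simp [h']))]
    simp

theorem dropWhile_cons_head {α : Type} (p : α → Bool) (l : List α) (d : α) (q : List α)
    (h : l.dropWhile p = d :: q) : p d = false := by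
  induction l with
  | nil => simp at h
  | cons a l ih =>
    by_cases hp : p a
    · rw [List.dropWhile_cons, if_pos hp] at h; exact ih h
    · rw [List.dropWhile_cons, if_neg hp] at h
      cases h; simpa using hp

-- a nonempty string accepted by A's pass contains "abc"
theorem accept_has_abc (cs : List Char) (hne : cs ≠ [])
    (h : cs.foldl isCoolStep (some []) = some []) : ['a', 'b', 'c'] <:+: cs := by
  set P : Char → Bool := fun c => c == 'a' || c == 'b' with hP
  have hsplit : cs.takeWhile P ++ cs.dropWhile P = cs := List.takeWhile_append_dropWhile
  have htw : ∀ c ∈ cs.takeWhile P, c = 'a' ∨ c = 'b' := by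
    intro c hc
    have := List.mem_takeWhile_imp hc
    simpa [hP] using this
  cases hdw : cs.dropWhile P with
  | nil =>
    exfalso
    have hcs := hsplit
    rw [hdw, List.append_nil] at hcs
    have hall : cs.foldl isCoolStep (some []) = some cs := by
      rw [← hcs, foldl_isCoolStep_ab _ [] htw, List.nil_append]
    rw [hall] at h
    injection h with h
    exact hne h
  | cons d q =>
    have hPd : P d = false := dropWhile_cons_head P cs d q hdw
    have hd : ¬ (d = 'a' ∨ d = 'b') := by
      intro hor; rcases hor with h' | h' <;> simp [hP, h'] at hPd
    have hpass : cs.foldl isCoolStep (some []) =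
        (d :: q).foldl isCoolStep (some (cs.takeWhile P)) := by
      conv_lhs => rw [← hsplit, hdw]
      rw [List.foldl_append, foldl_isCoolStep_ab _ [] htw]
      simp
    by_cases hdc : d = 'c'
    · subst hdc
      set t := cs.takeWhile P with ht
      by_cases hcond : t.length < 2 ∨ PySem.List.pyGet? t (-1) ≠ some 'b'
          ∨ PySem.List.pyGet? t (-2) ≠ some 'a'
      · exfalso
        rw [hpass, List.foldl_cons, show isCoolStep (some t) 'c' = none by
          simp [isCoolStep]
          intro h1 h2
          rcases hcond with hc | hc | hc
          · omega
          · exact absurd h2 hc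
          · exact hc, foldl_isCoolStep_none] at h
        exact absurd h (by simp)
      · push Not at hcond
        obtain ⟨hlen, hb, ha⟩ := hcond
        -- the stack t ends with "ab", so cs contains "abc"
        have h2 : 2 ≤ t.length := by omega
        have hbv : t[t.length - 1]? = some 'b' := by
          unfold PySem.List.pyGet? PySem.List.pyIdx? at hb
          rw [if_neg (by norm_num), if_pos (by omega)] at hb
          simpa using hb
        have hav : t[t.length - 2]? = some 'a' := by
          unfold PySem.List.pyGet? PySem.List.pyIdx? at ha
          rw [if_neg (by norm_num), if_pos (by omega)] at ha
          simpa using ha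
        have hdrop : t.drop (t.length - 2) = ['a', 'b'] := by
          apply List.ext_getElem?
          intro j
          match j with
          | 0 =>
            rw [List.getElem?_drop, show t.length - 2 + 0 = t.length - 2 by omega]
            simpa using hav
          | 1 =>
            rw [List.getElem?_drop, show t.length - 2 + 1 = t.length - 1 by omega]
            simpa using hbv
          | (n + 2) =>
            rw [List.getElem?_drop]
            have : t.length ≤ t.length - 2 + (n + 2) := by omega
            simp [List.getElem?_eq_none this]
        have hts : t = t.take (t.length - 2) ++ ['a', 'b'] := by
          rw [← hdrop, List.take_append_drop]
        refine ⟨t.take (t.length - 2), q, ?_⟩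
        conv_rhs => rw [← hsplit, hdw]
        conv_rhs => rw [hts]
        simp
    · exfalso
      rw [hpass, List.foldl_cons, show isCoolStep (some (cs.takeWhile P)) d = none by
        simp [isCoolStep, hdc, hd], foldl_isCoolStep_none] at h
      exact absurd h (by simp)

-- A's verdict is invariant under B's loop, and on the loop's fixed point both agree
theorem main_loop (cs : List Char) :
    (match cs.foldl isCoolStep (some []) with
      | none => false
      | some stack => stack.isEmpty) = (isCoolLoop cs == []) := by
  induction cs using isCoolLoop.induct with
  | case1 cs h =>
    rw [isCoolLoop, dif_pos h]
    by_cases hcs : cs = []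
    · subst hcs; rfl
    · have hinf : ¬ ['a', 'b', 'c'] <:+: cs := (PySem.Chars.find_eq_neg_one_iff cs _).mp h
      cases hp : cs.foldl isCoolStep (some []) with
      | none => simp [hcs]
      | some st =>
        have hst : st ≠ [] := by rintro rfl; exact hinf (accept_has_abc cs hcs hp)
        have h1 : st.isEmpty = false := by
          cases st with
          | nil => exact absurd rfl hst
          | cons a l => rfl
        have h2 : (cs == []) = false := by
          cases cs with
          | nil => exact absurd rfl hcs
          | cons a l => rfl
        show st.isEmpty = (cs == [])
        rw [h1, h2]
  | case2 cs h ih =>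
    rw [isCoolLoop, dif_neg h]
    have h0 : 0 ≤ PySem.Chars.find cs ['a', 'b', 'c'] := by
      rcases lt_or_eq_of_le (PySem.Chars.neg_one_le_find cs ['a', 'b', 'c']) with h' | h'
      · omega
      · exact absurd h'.symm h
    set i := PySem.Chars.find cs ['a', 'b', 'c'] with hi
    have hpre := (PySem.Chars.find_spec (s := cs) (sub := ['a', 'b', 'c']) h0).1
    obtain ⟨v, hv⟩ := hpre
    rw [← hi] at hv
    have hslice : PySem.Chars.slice cs none (some i) ++ PySem.Chars.slice cs (some (i + 3)) none
        = cs.take i.toNat ++ v := by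
      rw [PySem.Chars.slice_eq_listSlice, PySem.Chars.slice_eq_listSlice,
          PySem.List.slice_to _ h0, PySem.List.slice_from _ (by omega)]
      congr 1
      have hdd : List.drop ((i + 3).toNat) cs = List.drop 3 (List.drop i.toNat cs) := by
        rw [List.drop_drop]
        congr 1
        omega
      rw [hdd, ← hv]
      simp
    have hcs : cs = cs.take i.toNat ++ 'a' :: 'b' :: 'c' :: v := by
      conv_lhs => rw [← List.take_append_drop i.toNat cs]
      rw [← hv]
      rfl
    rw [hslice] at ih
    rw [hslice, show cs.foldl isCoolStep (some []) =
        (cs.take i.toNat ++ v).foldl isCoolStep (some []) by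
      conv_lhs => rw [hcs]
      exact foldl_isCoolStep_delete _ v]
    exact ih

-- ===== VERDICT (by name: the statement is the Claim_ definition above) =====
theorem isCool_spec : Claim_equal_isCool := by
  intro s _
  unfold Spec_isCool isCool isCool_alt
  exact main_loop s.toList
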